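-- pv_equiv track=rewrite | github.com/iamkissg/nowcoder | campus/创新奇智/回到原点 copy 2.py | can_return
-- ===== SOURCE A (Python) =====
-- Ds = {
--     'N': {'L': 'W', 'R': 'E'},
--     'W': {'L': 'S', 'R': 'N'},
--     'S': {'L': 'E', 'R': 'W'},
--     'E': {'L': 'N', 'R': 'S'},
-- }
--
-- def can_return(pos, direction, instructions):
--     if len(instructions) == 0 or 'G' not in instructions:
--         return 'Y'
--
--     steps = []
--     for it in instructions:
--         if it == 'G':
--             steps.append(direction)
--         elif it in {'L', 'R'}:
--             direction = Ds[direction][it]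
--
--     pre_steps = [steps[0]]
--     rest_steps = (steps*2)[1:]
--     for st in rest_steps:
--         if st == 'N':
--             if 'S' in pre_steps:
--                 pre_steps.remove('S')
--             else:
--                 pre_steps.append(st)
--
--         elif st == 'S':
--             if 'N' in pre_steps:
--                 pre_steps.remove('N')
--             else:
--                 pre_steps.append(st)
--
--         elif st == 'E':
--             if 'W' in pre_steps:
--                 pre_steps.remove('W')
--             else:
--                 pre_steps.append(st)
--
--         elif st == 'W':
--             if 'E' in pre_steps:
--                 pre_steps.remove('E')
--             else:
--                 pre_steps.append(st)
--
--         if len(pre_steps) == 0: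
--             return 'Y'
--     else:
--         return 'N'
-- ===== SOURCE B (Python) =====
-- def can_return(pos, direction, instructions):
--     # One pass: track net displacement (x, y) and the set of prefix displacements.
--     # The doubled walk revisits the origin iff the net is zero, some prefix is zero,
--     # or some prefix equals the negated net.
--     VEC = {'N': (0, 1), 'E': (1, 0), 'S': (0, -1), 'W': (-1, 0)}
--     LEFT = {'N': 'W', 'W': 'S', 'S': 'E', 'E': 'N'}
--     RIGHT = {'N': 'E', 'E': 'S', 'S': 'W', 'W': 'N'}
--     d = direction
--     x = y = 0
--     prefixes = set()
--     for c in instructions: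
--         if c == 'G':
--             dx, dy = VEC[d]
--             x += dx
--             y += dy
--             prefixes.add((x, y))
--         elif c == 'L':
--             d = LEFT[d]
--         elif c == 'R':
--             d = RIGHT[d]
--     if (x, y) == (0, 0) or (0, 0) in prefixes or (-x, -y) in prefixes:
--         return 'Y'
--     return 'N'
-- ===== Notes on version B (the rewrite author's own statement) =====
-- stated objective: alternative
-- what changed: A builds the step list, doubles it and simulates cancellation with 'in'/remove scans over a growing list with an early return; B makes one pass over the instructions tracking the net displacement (x,y) and a set of prefix displacements, then answers Y iff the net is zero, some prefix is zero, or some prefix equals the negated net.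
-- outside the precondition, e.g. on can_return([0, 0], 'X', 'G'): A returns 'N', B raises KeyError; on can_return([0, 0], 'Q', 'GGRG'): A raises KeyError, B raises KeyError
import Mathlib
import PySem

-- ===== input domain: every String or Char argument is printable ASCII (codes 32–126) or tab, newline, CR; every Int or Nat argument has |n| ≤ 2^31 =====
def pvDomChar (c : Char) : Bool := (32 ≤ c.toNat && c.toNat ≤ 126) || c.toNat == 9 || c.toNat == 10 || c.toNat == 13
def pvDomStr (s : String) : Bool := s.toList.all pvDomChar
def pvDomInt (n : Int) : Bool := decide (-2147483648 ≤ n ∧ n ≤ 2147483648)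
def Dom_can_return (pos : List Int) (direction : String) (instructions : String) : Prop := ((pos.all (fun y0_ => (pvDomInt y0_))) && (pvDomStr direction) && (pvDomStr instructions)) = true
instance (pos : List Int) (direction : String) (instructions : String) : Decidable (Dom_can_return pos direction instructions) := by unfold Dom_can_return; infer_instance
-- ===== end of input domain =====

-- B replaces A's cancel-and-remove simulation over the doubled step list by one single
-- pass collecting net and prefix displacements into a set (objective: alternative).

-- ===== PORT A =====
def pvDs : PySem.Dict String (PySem.Dict String String) :=
  PySem.Dict.ofList
    [("N", PySem.Dict.ofList [("L", "W"), ("R", "E")]),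
     ("W", PySem.Dict.ofList [("L", "S"), ("R", "N")]),
     ("S", PySem.Dict.ofList [("L", "E"), ("R", "W")]),
     ("E", PySem.Dict.ofList [("L", "N"), ("R", "S")])]

-- first loop of A: build `steps`, turning `direction` on 'L'/'R'
def pvStepsLoop : List Char → String → List String → String × List String
  | [], dir, steps => (dir, steps)
  | it :: rest, dir, steps =>
    if it = 'G' then pvStepsLoop rest dir (steps ++ [dir])
    else if it = 'L' ∨ it = 'R' then
      match pvDs.get? dir with
      | some inner =>
        match inner.get? (String.ofList [it]) with
        | some d' => pvStepsLoop rest d' steps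
        | none => pvStepsLoop rest dir steps     -- Python: KeyError (outside Pre_)
      | none => pvStepsLoop rest dir steps       -- Python: KeyError (outside Pre_)
    else pvStepsLoop rest dir steps

-- body of A's second loop: cancel an opposite step or append
def pvCancel (pre : List String) (st : String) : List String :=
  if st = "N" then
    (if "S" ∈ pre then (PySem.List.remove? pre "S").getD pre else pre ++ [st])
  else if st = "S" then
    (if "N" ∈ pre then (PySem.List.remove? pre "N").getD pre else pre ++ [st])
  else if st = "E" then
    (if "W" ∈ pre then (PySem.List.remove? pre "W").getD pre else pre ++ [st])
  else if st = "W" then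
    (if "E" ∈ pre then (PySem.List.remove? pre "E").getD pre else pre ++ [st])
  else pre

-- second loop of A, with the early `return 'Y'` and the for-else `return 'N'`
def pvCancelLoop : List String → List String → String
  | [], _ => "N"
  | st :: rest, pre =>
    let pre' := pvCancel pre st
    if pre'.length = 0 then "Y" else pvCancelLoop rest pre'

def can_return (pos : List Int) (direction : String) (instructions : String) : String :=
  if PySem.Str.len instructions = 0 ∨ PySem.Str.isIn "G" instructions = false then "Y"
  else
    let r := pvStepsLoop instructions.toList direction []
    match PySem.List.pyGet? r.2 0 with
    | none => "Y"                                -- Python: IndexError (unreachable: 'G' present ⇒ steps ≠ [])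
    | some s0 =>
      pvCancelLoop (PySem.List.slice (PySem.List.pyRepeat r.2 2) (some 1) none) [s0]

-- ===== PORT B =====
def pvVEC : PySem.Dict String (Int × Int) :=
  PySem.Dict.ofList [("N", (0, 1)), ("E", (1, 0)), ("S", (0, -1)), ("W", (-1, 0))]
def pvLEFT : PySem.Dict String String :=
  PySem.Dict.ofList [("N", "W"), ("W", "S"), ("S", "E"), ("E", "N")]
def pvRIGHT : PySem.Dict String String :=
  PySem.Dict.ofList [("N", "E"), ("E", "S"), ("S", "W"), ("W", "N")]

-- B's single loop: direction, net displacement (x, y), set of prefix displacements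
def pvAltLoop : List Char → String × Int × Int × PySem.Set (Int × Int) → String × Int × Int × PySem.Set (Int × Int)
  | [], st => st
  | c :: rest, (d, x, y, P) =>
    if c = 'G' then
      match pvVEC.get? d with
      | some (dx, dy) => pvAltLoop rest (d, x + dx, y + dy, PySem.Set.add P (x + dx, y + dy))
      | none => pvAltLoop rest (d, x, y, P)      -- Python: KeyError (outside Pre_)
    else if c = 'L' then
      match pvLEFT.get? d with
      | some d' => pvAltLoop rest (d', x, y, P)
      | none => pvAltLoop rest (d, x, y, P)      -- Python: KeyError (outside Pre_)
    else if c = 'R' then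
      match pvRIGHT.get? d with
      | some d' => pvAltLoop rest (d', x, y, P)
      | none => pvAltLoop rest (d, x, y, P)      -- Python: KeyError (outside Pre_)
    else pvAltLoop rest (d, x, y, P)

def can_return_alt (pos : List Int) (direction : String) (instructions : String) : String :=
  match pvAltLoop instructions.toList (direction, 0, 0, PySem.Set.empty) with
  | (_, x, y, prefixes) =>
    if (x, y) = ((0 : Int), (0 : Int)) ∨ ((0, 0) : Int × Int) ∈ prefixes
        ∨ ((-x, -y) : Int × Int) ∈ prefixes then "Y"
    else "N"

-- ===== PRECONDITION & SPEC =====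
-- Pre_ restricts to A's natural domain: a direction among N/E/S/W — outside it A raises
-- KeyError whenever an 'L'/'R' is reached and, when a 'G' is reached, returns 'N' only
-- because the unrecognised direction string sticks in pre_steps forever (B's dict lookup
-- raises KeyError there); inputs whose instructions contain no 'G'/'L'/'R' never touch the
-- direction and stay admitted for any direction.
def Pre_can_return (pos : List Int) (direction : String) (instructions : String) : Prop :=
  direction ∈ (["N", "E", "S", "W"] : List String) ∨
    ∀ c ∈ instructions.toList, c ≠ 'G' ∧ c ≠ 'L' ∧ c ≠ 'R'
instance (pos : List Int) (direction : String) (instructions : String) : Decidable (Pre_can_return pos direction instructions) := by unfold Pre_can_return; infer_instance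

def pvWitness_can_return : List Int × String × String := ([0, 1], "N", "GLG")

def Spec_can_return (pos : List Int) (direction : String) (instructions : String) (out : String) : Prop := out = can_return_alt pos direction instructions
instance (pos : List Int) (direction : String) (instructions : String) (out : String) : Decidable (Spec_can_return pos direction instructions out) := by unfold Spec_can_return; infer_instance

-- ===== CLAIM (what is proved, stated in full; the proofs are below) =====
def Claim_equal_can_return : Prop := ∀ (pos : List Int) (direction : String) (instructions : String), Dom_can_return pos direction instructions → Pre_can_return pos direction instructions → Spec_can_return pos direction instructions (can_return pos direction instructions)

-- ===== LEMMAS AND PROOFS =====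

-- reference abstractions shared by both proofs
def pvValidD (d : String) : Prop := d = "N" ∨ d = "E" ∨ d = "S" ∨ d = "W"

def pvTurnL (d : String) : String :=
  if d = "N" then "W" else if d = "W" then "S" else if d = "S" then "E" else "N"
def pvTurnR (d : String) : String :=
  if d = "N" then "E" else if d = "E" then "S" else if d = "S" then "W" else "N"

def pvStepsOf : List Char → String → List String
  | [], _ => []
  | c :: cs, d =>
    if c = 'G' then d :: pvStepsOf cs d
    else if c = 'L' then pvStepsOf cs (pvTurnL d)
    else if c = 'R' then pvStepsOf cs (pvTurnR d)
    else pvStepsOf cs d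

def pvVec (s : String) : Int × Int :=
  if s = "N" then (0, 1) else if s = "E" then (1, 0)
  else if s = "S" then (0, -1) else if s = "W" then (-1, 0) else (0, 0)

def pvPadd (p q : Int × Int) : Int × Int := (p.1 + q.1, p.2 + q.2)

def pvPrefixes : Int × Int → List String → List (Int × Int)
  | _, [] => []
  | p, s :: rest => pvPadd p (pvVec s) :: pvPrefixes (pvPadd p (pvVec s)) rest

def pvFoldAdd (p : Int × Int) (l : List String) : Int × Int :=
  l.foldl (fun q s => pvPadd q (pvVec s)) p

def pvNet (l : List String) : Int × Int :=
  ((l.count "E" : Int) - (l.count "W" : Int), (l.count "N" : Int) - (l.count "S" : Int))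

def pvInv (l : List String) : Prop :=
  (∀ s ∈ l, pvValidD s) ∧ (l.count "N" = 0 ∨ l.count "S" = 0) ∧ (l.count "E" = 0 ∨ l.count "W" = 0)

-- small algebraic facts about the abstractions
theorem pvPadd_zero (p : Int × Int) : pvPadd p (0, 0) = p := by
  simp [pvPadd]

theorem pvPadd_assoc (q p v : Int × Int) : pvPadd (pvPadd q p) v = pvPadd q (pvPadd p v) := by
  simp [pvPadd]; omega

theorem pvTurnL_valid (d : String) (h : pvValidD d) : pvValidD (pvTurnL d) := by
  rcases h with rfl | rfl | rfl | rfl <;> simp [pvTurnL, pvValidD]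
theorem pvTurnR_valid (d : String) (h : pvValidD d) : pvValidD (pvTurnR d) := by
  rcases h with rfl | rfl | rfl | rfl <;> simp [pvTurnR, pvValidD]

theorem pvStepsOf_valid (cs : List Char) (d : String) (h : pvValidD d) :
    ∀ s ∈ pvStepsOf cs d, pvValidD s := by
  induction cs generalizing d with
  | nil => simp [pvStepsOf]
  | cons c cs ih =>
    intro s hs
    simp only [pvStepsOf] at hs
    split_ifs at hs with h1 h2 h3
    · rcases List.mem_cons.mp hs with rfl | hs'
      · exact h
      · exact ih d h s hs'
    · exact ih _ (pvTurnL_valid d h) s hs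
    · exact ih _ (pvTurnR_valid d h) s hs
    · exact ih d h s hs

theorem pvStepsOf_ne_nil (cs : List Char) (d : String) (h : 'G' ∈ cs) :
    pvStepsOf cs d ≠ [] := by
  induction cs generalizing d with
  | nil => simp at h
  | cons c cs ih =>
    simp only [pvStepsOf]
    split_ifs with h1 h2 h3
    · simp
    · exact ih _ ((List.mem_cons.mp h).resolve_left (fun e => h1 e.symm))
    · exact ih _ ((List.mem_cons.mp h).resolve_left (fun e => h1 e.symm))
    · exact ih _ ((List.mem_cons.mp h).resolve_left (fun e => h1 e.symm))

theorem pvStepsOf_eq_nil (cs : List Char) (d : String) (h : 'G' ∉ cs) :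
    pvStepsOf cs d = [] := by
  induction cs generalizing d with
  | nil => rfl
  | cons c cs ih =>
    have hc : ¬ c = 'G' := fun e => h (e ▸ List.mem_cons_self)
    have ht : 'G' ∉ cs := fun e => h (List.mem_cons_of_mem c e)
    simp only [pvStepsOf, if_neg hc]
    split_ifs <;> exact ih _ ht

theorem pvStepsLoop_eq (cs : List Char) (d : String) (acc : List String) (h : pvValidD d) :
    (pvStepsLoop cs d acc).2 = acc ++ pvStepsOf cs d := by
  induction cs generalizing d acc with
  | nil => simp [pvStepsLoop, pvStepsOf]
  | cons c cs ih =>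
    by_cases hG : c = 'G'
    · subst hG
      rw [show pvStepsLoop ('G' :: cs) d acc = pvStepsLoop cs d (acc ++ [d]) from rfl,
          show pvStepsOf ('G' :: cs) d = d :: pvStepsOf cs d from rfl, ih d (acc ++ [d]) h]
      simp
    · by_cases hL : c = 'L'
      · subst hL
        rcases h with rfl | rfl | rfl | rfl
        · rw [show pvStepsLoop ('L' :: cs) "N" acc = pvStepsLoop cs "W" acc from rfl,
              show pvStepsOf ('L' :: cs) "N" = pvStepsOf cs "W" from rfl]
          exact ih "W" acc (by simp [pvValidD])
        · rw [show pvStepsLoop ('L' :: cs) "E" acc = pvStepsLoop cs "N" acc from rfl,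
              show pvStepsOf ('L' :: cs) "E" = pvStepsOf cs "N" from rfl]
          exact ih "N" acc (by simp [pvValidD])
        · rw [show pvStepsLoop ('L' :: cs) "S" acc = pvStepsLoop cs "E" acc from rfl,
              show pvStepsOf ('L' :: cs) "S" = pvStepsOf cs "E" from rfl]
          exact ih "E" acc (by simp [pvValidD])
        · rw [show pvStepsLoop ('L' :: cs) "W" acc = pvStepsLoop cs "S" acc from rfl,
              show pvStepsOf ('L' :: cs) "W" = pvStepsOf cs "S" from rfl]
          exact ih "S" acc (by simp [pvValidD])
      · by_cases hR : c = 'R'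
        · subst hR
          rcases h with rfl | rfl | rfl | rfl
          · rw [show pvStepsLoop ('R' :: cs) "N" acc = pvStepsLoop cs "E" acc from rfl,
                show pvStepsOf ('R' :: cs) "N" = pvStepsOf cs "E" from rfl]
            exact ih "E" acc (by simp [pvValidD])
          · rw [show pvStepsLoop ('R' :: cs) "E" acc = pvStepsLoop cs "S" acc from rfl,
                show pvStepsOf ('R' :: cs) "E" = pvStepsOf cs "S" from rfl]
            exact ih "S" acc (by simp [pvValidD])
          · rw [show pvStepsLoop ('R' :: cs) "S" acc = pvStepsLoop cs "W" acc from rfl,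
                show pvStepsOf ('R' :: cs) "S" = pvStepsOf cs "W" from rfl]
            exact ih "W" acc (by simp [pvValidD])
          · rw [show pvStepsLoop ('R' :: cs) "W" acc = pvStepsLoop cs "N" acc from rfl,
                show pvStepsOf ('R' :: cs) "W" = pvStepsOf cs "N" from rfl]
            exact ih "N" acc (by simp [pvValidD])
        · have h2 : ¬ (c = 'L' ∨ c = 'R') := by tauto
          simp only [pvStepsLoop, if_neg hG, if_neg h2, pvStepsOf, if_neg hL, if_neg hR]
          exact ih d acc h

theorem pvAltLoop_eq (cs : List Char) (d : String) (x y : Int) (P : PySem.Set (Int × Int))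
    (h : pvValidD d) :
    ((pvAltLoop cs (d, x, y, P)).2.1, (pvAltLoop cs (d, x, y, P)).2.2.1)
        = pvFoldAdd (x, y) (pvStepsOf cs d)
      ∧ (pvAltLoop cs (d, x, y, P)).2.2.2
        = PySem.Set.update P (pvPrefixes (x, y) (pvStepsOf cs d)) := by
  induction cs generalizing d x y P with
  | nil =>
    simp [pvAltLoop, pvStepsOf, pvFoldAdd, pvPrefixes, PySem.Set.update_nil]
  | cons c cs ih =>
    by_cases hG : c = 'G'
    · subst hG
      rcases h with rfl | rfl | rfl | rfl
      · rw [show pvAltLoop ('G' :: cs) ("N", x, y, P)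
              = pvAltLoop cs ("N", x + 0, y + 1, PySem.Set.add P (x + 0, y + 1)) from rfl,
            show pvStepsOf ('G' :: cs) "N" = "N" :: pvStepsOf cs "N" from rfl,
            show pvFoldAdd (x, y) ("N" :: pvStepsOf cs "N")
              = pvFoldAdd (x + 0, y + 1) (pvStepsOf cs "N") from rfl,
            show pvPrefixes (x, y) ("N" :: pvStepsOf cs "N")
              = (x + 0, y + 1) :: pvPrefixes (x + 0, y + 1) (pvStepsOf cs "N") from rfl,
            PySem.Set.update_cons]
        exact ih "N" (x + 0) (y + 1) _ (by simp [pvValidD])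
      · rw [show pvAltLoop ('G' :: cs) ("E", x, y, P)
              = pvAltLoop cs ("E", x + 1, y + 0, PySem.Set.add P (x + 1, y + 0)) from rfl,
            show pvStepsOf ('G' :: cs) "E" = "E" :: pvStepsOf cs "E" from rfl,
            show pvFoldAdd (x, y) ("E" :: pvStepsOf cs "E")
              = pvFoldAdd (x + 1, y + 0) (pvStepsOf cs "E") from rfl,
            show pvPrefixes (x, y) ("E" :: pvStepsOf cs "E")
              = (x + 1, y + 0) :: pvPrefixes (x + 1, y + 0) (pvStepsOf cs "E") from rfl,
            PySem.Set.update_cons]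
        exact ih "E" (x + 1) (y + 0) _ (by simp [pvValidD])
      · rw [show pvAltLoop ('G' :: cs) ("S", x, y, P)
              = pvAltLoop cs ("S", x + 0, y + -1, PySem.Set.add P (x + 0, y + -1)) from rfl,
            show pvStepsOf ('G' :: cs) "S" = "S" :: pvStepsOf cs "S" from rfl,
            show pvFoldAdd (x, y) ("S" :: pvStepsOf cs "S")
              = pvFoldAdd (x + 0, y + -1) (pvStepsOf cs "S") from rfl,
            show pvPrefixes (x, y) ("S" :: pvStepsOf cs "S")
              = (x + 0, y + -1) :: pvPrefixes (x + 0, y + -1) (pvStepsOf cs "S") from rfl,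
            PySem.Set.update_cons]
        exact ih "S" (x + 0) (y + -1) _ (by simp [pvValidD])
      · rw [show pvAltLoop ('G' :: cs) ("W", x, y, P)
              = pvAltLoop cs ("W", x + -1, y + 0, PySem.Set.add P (x + -1, y + 0)) from rfl,
            show pvStepsOf ('G' :: cs) "W" = "W" :: pvStepsOf cs "W" from rfl,
            show pvFoldAdd (x, y) ("W" :: pvStepsOf cs "W")
              = pvFoldAdd (x + -1, y + 0) (pvStepsOf cs "W") from rfl,
            show pvPrefixes (x, y) ("W" :: pvStepsOf cs "W")
              = (x + -1, y + 0) :: pvPrefixes (x + -1, y + 0) (pvStepsOf cs "W") from rfl,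
            PySem.Set.update_cons]
        exact ih "W" (x + -1) (y + 0) _ (by simp [pvValidD])
    · by_cases hL : c = 'L'
      · subst hL
        rcases h with rfl | rfl | rfl | rfl
        · rw [show pvAltLoop ('L' :: cs) ("N", x, y, P) = pvAltLoop cs ("W", x, y, P) from rfl,
              show pvStepsOf ('L' :: cs) "N" = pvStepsOf cs "W" from rfl]
          exact ih "W" x y P (by simp [pvValidD])
        · rw [show pvAltLoop ('L' :: cs) ("E", x, y, P) = pvAltLoop cs ("N", x, y, P) from rfl,
              show pvStepsOf ('L' :: cs) "E" = pvStepsOf cs "N" from rfl]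
          exact ih "N" x y P (by simp [pvValidD])
        · rw [show pvAltLoop ('L' :: cs) ("S", x, y, P) = pvAltLoop cs ("E", x, y, P) from rfl,
              show pvStepsOf ('L' :: cs) "S" = pvStepsOf cs "E" from rfl]
          exact ih "E" x y P (by simp [pvValidD])
        · rw [show pvAltLoop ('L' :: cs) ("W", x, y, P) = pvAltLoop cs ("S", x, y, P) from rfl,
              show pvStepsOf ('L' :: cs) "W" = pvStepsOf cs "S" from rfl]
          exact ih "S" x y P (by simp [pvValidD])
      · by_cases hR : c = 'R'
        · subst hR
          rcases h with rfl | rfl | rfl | rfl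
          · rw [show pvAltLoop ('R' :: cs) ("N", x, y, P) = pvAltLoop cs ("E", x, y, P) from rfl,
                show pvStepsOf ('R' :: cs) "N" = pvStepsOf cs "E" from rfl]
            exact ih "E" x y P (by simp [pvValidD])
          · rw [show pvAltLoop ('R' :: cs) ("E", x, y, P) = pvAltLoop cs ("S", x, y, P) from rfl,
                show pvStepsOf ('R' :: cs) "E" = pvStepsOf cs "S" from rfl]
            exact ih "S" x y P (by simp [pvValidD])
          · rw [show pvAltLoop ('R' :: cs) ("S", x, y, P) = pvAltLoop cs ("W", x, y, P) from rfl,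
                show pvStepsOf ('R' :: cs) "S" = pvStepsOf cs "W" from rfl]
            exact ih "W" x y P (by simp [pvValidD])
          · rw [show pvAltLoop ('R' :: cs) ("W", x, y, P) = pvAltLoop cs ("N", x, y, P) from rfl,
                show pvStepsOf ('R' :: cs) "W" = pvStepsOf cs "N" from rfl]
            exact ih "N" x y P (by simp [pvValidD])
        · simp only [pvAltLoop, if_neg hG, if_neg hL, if_neg hR, pvStepsOf]
          exact ih d x y P h

theorem pvAltLoop_skip (cs : List Char) (st : String × Int × Int × PySem.Set (Int × Int))
    (h : ∀ c ∈ cs, c ≠ 'G' ∧ c ≠ 'L' ∧ c ≠ 'R') :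
    pvAltLoop cs st = st := by
  induction cs with
  | nil => rfl
  | cons c cs ih =>
    obtain ⟨d, x, y, P⟩ := st
    obtain ⟨h1, h2, h3⟩ := h c List.mem_cons_self
    simp only [pvAltLoop, if_neg h1, if_neg h2, if_neg h3]
    exact ih (fun c hc => h c (List.mem_cons_of_mem _ hc))

theorem pvCancel_spec (pre : List String) (st : String) (hst : pvValidD st) (hI : pvInv pre) :
    pvInv (pvCancel pre st) ∧ pvNet (pvCancel pre st) = pvPadd (pvNet pre) (pvVec st) := by
  obtain ⟨hmem, hNS, hEW⟩ := hI
  rcases hst with rfl | rfl | rfl | rfl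
  · -- st = "N": cancels "S"
    by_cases hS : "S" ∈ pre
    · have hrm : pvCancel pre "N" = pre.erase "S" := by
        simp [pvCancel, hS, PySem.List.remove?_eq_some_erase pre "S" hS]
      have hcS : (pre.erase "S").count "S" = pre.count "S" - 1 := List.count_erase_self ..
      have hcN : (pre.erase "S").count "N" = pre.count "N" := List.count_erase_of_ne (show ("N":String) ≠ "S" by decide)
      have hcE : (pre.erase "S").count "E" = pre.count "E" := List.count_erase_of_ne (show ("E":String) ≠ "S" by decide)
      have hcW : (pre.erase "S").count "W" = pre.count "W" := List.count_erase_of_ne (show ("W":String) ≠ "S" by decide)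
      have hSpos : 0 < pre.count "S" := List.count_pos_iff.mpr hS
      refine ⟨⟨fun s hs => hmem s (List.mem_of_mem_erase (hrm ▸ hs)), ?_, ?_⟩, ?_⟩
      · rw [hrm, hcN]; omega
      · rw [hrm, hcE, hcW]; exact hEW
      · rw [hrm]; simp [pvNet, pvPadd, pvVec, hcS, hcN, hcE, hcW, Prod.ext_iff]
        omega
    · have happ : pvCancel pre "N" = pre ++ ["N"] := by simp [pvCancel, hS]
      have hS0 : pre.count "S" = 0 := List.count_eq_zero.mpr hS
      refine ⟨⟨?_, ?_, ?_⟩, ?_⟩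
      · intro s hs
        rcases List.mem_append.mp (happ ▸ hs) with h' | h'
        · exact hmem s h'
        · simp at h'; subst h'; simp [pvValidD]
      · rw [happ]; right; simp [List.count_append, hS0]
      · rw [happ]; simpa [List.count_append] using hEW
      · rw [happ]; simp [pvNet, pvPadd, pvVec, List.count_append, List.count_cons, List.count_nil, Prod.ext_iff]
        omega
  · -- st = "E": cancels "W"
    by_cases hW : "W" ∈ pre
    · have hrm : pvCancel pre "E" = pre.erase "W" := by
        simp [pvCancel, hW, PySem.List.remove?_eq_some_erase pre "W" hW]
      have hcW : (pre.erase "W").count "W" = pre.count "W" - 1 := List.count_erase_self ..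
      have hcN : (pre.erase "W").count "N" = pre.count "N" := List.count_erase_of_ne (show ("N":String) ≠ "W" by decide)
      have hcE : (pre.erase "W").count "E" = pre.count "E" := List.count_erase_of_ne (show ("E":String) ≠ "W" by decide)
      have hcS : (pre.erase "W").count "S" = pre.count "S" := List.count_erase_of_ne (show ("S":String) ≠ "W" by decide)
      have hWpos : 0 < pre.count "W" := List.count_pos_iff.mpr hW
      refine ⟨⟨fun s hs => hmem s (List.mem_of_mem_erase (hrm ▸ hs)), ?_, ?_⟩, ?_⟩
      · rw [hrm, hcN, hcS]; exact hNS
      · rw [hrm, hcE]; omega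
      · rw [hrm]; simp [pvNet, pvPadd, pvVec, hcS, hcN, hcE, hcW, Prod.ext_iff]
        omega
    · have happ : pvCancel pre "E" = pre ++ ["E"] := by simp [pvCancel, hW]
      have hW0 : pre.count "W" = 0 := List.count_eq_zero.mpr hW
      refine ⟨⟨?_, ?_, ?_⟩, ?_⟩
      · intro s hs
        rcases List.mem_append.mp (happ ▸ hs) with h' | h'
        · exact hmem s h'
        · simp at h'; subst h'; simp [pvValidD]
      · rw [happ]; simpa [List.count_append] using hNS
      · rw [happ]; right; simp [List.count_append, hW0]
      · rw [happ]; simp [pvNet, pvPadd, pvVec, List.count_append, List.count_cons, List.count_nil, Prod.ext_iff]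
        omega
  · -- st = "S": cancels "N"
    by_cases hN : "N" ∈ pre
    · have hrm : pvCancel pre "S" = pre.erase "N" := by
        simp [pvCancel, hN, PySem.List.remove?_eq_some_erase pre "N" hN]
      have hcN : (pre.erase "N").count "N" = pre.count "N" - 1 := List.count_erase_self ..
      have hcS : (pre.erase "N").count "S" = pre.count "S" := List.count_erase_of_ne (show ("S":String) ≠ "N" by decide)
      have hcE : (pre.erase "N").count "E" = pre.count "E" := List.count_erase_of_ne (show ("E":String) ≠ "N" by decide)
      have hcW : (pre.erase "N").count "W" = pre.count "W" := List.count_erase_of_ne (show ("W":String) ≠ "N" by decide)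
      have hNpos : 0 < pre.count "N" := List.count_pos_iff.mpr hN
      refine ⟨⟨fun s hs => hmem s (List.mem_of_mem_erase (hrm ▸ hs)), ?_, ?_⟩, ?_⟩
      · rw [hrm, hcS]; omega
      · rw [hrm, hcE, hcW]; exact hEW
      · rw [hrm]; simp [pvNet, pvPadd, pvVec, hcS, hcN, hcE, hcW, Prod.ext_iff]
        omega
    · have happ : pvCancel pre "S" = pre ++ ["S"] := by simp [pvCancel, hN]
      have hN0 : pre.count "N" = 0 := List.count_eq_zero.mpr hN
      refine ⟨⟨?_, ?_, ?_⟩, ?_⟩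
      · intro s hs
        rcases List.mem_append.mp (happ ▸ hs) with h' | h'
        · exact hmem s h'
        · simp at h'; subst h'; simp [pvValidD]
      · rw [happ]; left; simp [List.count_append, hN0]
      · rw [happ]; simpa [List.count_append] using hEW
      · rw [happ]; simp [pvNet, pvPadd, pvVec, List.count_append, List.count_cons, List.count_nil, Prod.ext_iff]
        omega
  · -- st = "W": cancels "E"
    by_cases hE : "E" ∈ pre
    · have hrm : pvCancel pre "W" = pre.erase "E" := by
        simp [pvCancel, hE, PySem.List.remove?_eq_some_erase pre "E" hE]
      have hcE : (pre.erase "E").count "E" = pre.count "E" - 1 := List.count_erase_self ..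
      have hcN : (pre.erase "E").count "N" = pre.count "N" := List.count_erase_of_ne (show ("N":String) ≠ "E" by decide)
      have hcS : (pre.erase "E").count "S" = pre.count "S" := List.count_erase_of_ne (show ("S":String) ≠ "E" by decide)
      have hcW : (pre.erase "E").count "W" = pre.count "W" := List.count_erase_of_ne (show ("W":String) ≠ "E" by decide)
      have hEpos : 0 < pre.count "E" := List.count_pos_iff.mpr hE
      refine ⟨⟨fun s hs => hmem s (List.mem_of_mem_erase (hrm ▸ hs)), ?_, ?_⟩, ?_⟩
      · rw [hrm, hcN, hcS]; exact hNS
      · rw [hrm, hcW]; omega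
      · rw [hrm]; simp [pvNet, pvPadd, pvVec, hcS, hcN, hcE, hcW, Prod.ext_iff]
        omega
    · have happ : pvCancel pre "W" = pre ++ ["W"] := by simp [pvCancel, hE]
      have hE0 : pre.count "E" = 0 := List.count_eq_zero.mpr hE
      refine ⟨⟨?_, ?_, ?_⟩, ?_⟩
      · intro s hs
        rcases List.mem_append.mp (happ ▸ hs) with h' | h'
        · exact hmem s h'
        · simp at h'; subst h'; simp [pvValidD]
      · rw [happ]; simpa [List.count_append] using hNS
      · rw [happ]; left; simp [List.count_append, hE0]
      · rw [happ]; simp [pvNet, pvPadd, pvVec, List.count_append, List.count_cons, List.count_nil, Prod.ext_iff]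
        omega

theorem pvNet_zero_iff (pre : List String) (hI : pvInv pre) :
    pvNet pre = (0, 0) ↔ pre = [] := by
  obtain ⟨hmem, hNS, hEW⟩ := hI
  constructor
  · intro h
    rcases pre with _ | ⟨s, rest⟩
    · rfl
    · exfalso
      simp only [pvNet, Prod.ext_iff] at h
      have hv := hmem s List.mem_cons_self
      rcases hv with rfl | rfl | rfl | rfl
      · have hp : 0 < List.count "N" ("N" :: rest) := List.count_pos_iff.mpr List.mem_cons_self
        omega
      · have hp : 0 < List.count "E" ("E" :: rest) := List.count_pos_iff.mpr List.mem_cons_self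
        omega
      · have hp : 0 < List.count "S" ("S" :: rest) := List.count_pos_iff.mpr List.mem_cons_self
        omega
      · have hp : 0 < List.count "W" ("W" :: rest) := List.count_pos_iff.mpr List.mem_cons_self
        omega
  · rintro rfl; rfl

theorem pvCancelLoop_spec (L : List String) (pre : List String)
    (hL : ∀ s ∈ L, pvValidD s) (hI : pvInv pre) :
    (pvCancelLoop L pre = "Y" ↔ ((0, 0) : Int × Int) ∈ pvPrefixes (pvNet pre) L) := by
  induction L generalizing pre with
  | nil => simp [pvCancelLoop, pvPrefixes]
  | cons st rest ih =>
    obtain ⟨hI', hnet⟩ := pvCancel_spec pre st (hL st List.mem_cons_self) hI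
    simp only [pvCancelLoop, pvPrefixes]
    by_cases h0 : pvCancel pre st = []
    · rw [if_pos (by simp [h0])]
      have : pvNet (pvCancel pre st) = (0, 0) := by rw [h0]; rfl
      simp [← hnet, this]
    · rw [if_neg (by simpa using h0)]
      rw [ih (pvCancel pre st) (fun s hs => hL s (List.mem_cons_of_mem _ hs)) hI', ← hnet]
      have hne : pvNet (pvCancel pre st) ≠ (0, 0) := by
        intro e; exact h0 ((pvNet_zero_iff _ hI').mp e)
      constructor
      · intro h; exact List.mem_cons_of_mem _ h
      · intro h
        rcases List.mem_cons.mp h with h' | h'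
        · exact absurd h'.symm hne
        · exact h'

theorem pvCancelLoop_cases (L : List String) (pre : List String) :
    pvCancelLoop L pre = "Y" ∨ pvCancelLoop L pre = "N" := by
  induction L generalizing pre with
  | nil => right; rfl
  | cons st rest ih =>
    simp only [pvCancelLoop]
    split_ifs
    · left; rfl
    · exact ih _

theorem pvPrefixes_append (p : Int × Int) (l1 l2 : List String) :
    pvPrefixes p (l1 ++ l2) = pvPrefixes p l1 ++ pvPrefixes (pvFoldAdd p l1) l2 := by
  induction l1 generalizing p with
  | nil => simp [pvPrefixes, pvFoldAdd]
  | cons s rest ih =>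
    simp only [List.cons_append, pvPrefixes, List.foldl_cons, pvFoldAdd] at *
    rw [ih]

theorem pvPrefixes_shift (q p : Int × Int) (l : List String) :
    pvPrefixes (pvPadd q p) l = (pvPrefixes p l).map (pvPadd q) := by
  induction l generalizing p with
  | nil => simp [pvPrefixes]
  | cons s rest ih =>
    simp only [pvPrefixes, List.map_cons, pvPadd_assoc, ih]

theorem pvFoldAdd_mem (p : Int × Int) (l : List String) (h : l ≠ []) :
    pvFoldAdd p l ∈ pvPrefixes p l := by
  induction l generalizing p with
  | nil => exact absurd rfl h
  | cons s rest ih =>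
    rcases rest with _ | ⟨t, ts⟩
    · simp [pvFoldAdd, pvPrefixes]
    · have : pvFoldAdd p (s :: t :: ts) = pvFoldAdd (pvPadd p (pvVec s)) (t :: ts) := rfl
      rw [this]
      exact List.mem_cons_of_mem _ (ih (pvPadd p (pvVec s)) (by simp))

theorem pvGstr : ("G" : String).toList = ['G'] := rfl

-- ===== VERDICT (by name: the statement is the Claim_ definition above) =====
theorem can_return_spec : Claim_equal_can_return := by
  intro pos direction instructions _dom hpre
  unfold Spec_can_return
  by_cases hG : 'G' ∈ instructions.toList
  · -- a 'G' is present: a valid direction is forced by Pre_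
    have hd : pvValidD direction := by
      rcases hpre with h | h
      · simpa [pvValidD] using h
      · exact absurd rfl (h 'G' hG).1
    have hIn : PySem.Str.isIn "G" instructions = true :=
      (PySem.Str.isIn_iff_infix _ _).mpr (pvGstr ▸ (List.singleton_infix_iff _ _).mpr hG)
    have hlenne : instructions.toList ≠ [] := by
      intro e; rw [e] at hG; simp at hG
    have hlen0 : ¬ (PySem.Str.len instructions = 0) := by
      rw [PySem.Str.len_eq]
      simpa using hlenne
    set S := pvStepsOf instructions.toList direction with hSdef
    have hSne : S ≠ [] := pvStepsOf_ne_nil _ _ hG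
    obtain ⟨s0, t, hSeq⟩ : ∃ s0 t, S = s0 :: t := by
      rcases S with _ | ⟨a, b⟩
      · exact absurd rfl hSne
      · exact ⟨a, b, rfl⟩
    have hSvalid : ∀ s ∈ S, pvValidD s := pvStepsOf_valid _ _ hd
    have hs0v : pvValidD s0 := hSvalid s0 (by rw [hSeq]; exact List.mem_cons_self)
    -- evaluate port A down to pvCancelLoop over the doubled steps
    have hsteps : (pvStepsLoop instructions.toList direction []).2 = S := by
      rw [pvStepsLoop_eq _ _ _ hd]; simp [hSdef]
    have hA : can_return pos direction instructions = pvCancelLoop (t ++ S) [s0] := by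
      unfold can_return
      rw [if_neg (by push_neg; exact ⟨hlen0, by simpa using hIn⟩)]
      simp only [hsteps, hSeq]
      rw [show PySem.List.pyGet? (s0 :: t) 0 = some s0 from by simp [pysem],
          show PySem.List.pyRepeat (s0 :: t) 2 = (s0 :: t) ++ (s0 :: t) from by
            simp [PySem.List.pyRepeat],
          PySem.List.slice_from_one]
      rfl
    have hc0 : pvCancel [] s0 = [s0] := by
      rcases hs0v with rfl | rfl | rfl | rfl <;> rfl
    have hbridge : pvCancelLoop (t ++ S) [s0] = pvCancelLoop (S ++ S) [] := by
      rw [hSeq, List.cons_append]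
      simp only [pvCancelLoop]
      rw [hc0, if_neg (by simp)]
    have hIe : pvInv ([] : List String) := ⟨by simp, by simp, by simp⟩
    have hdbl : ∀ s ∈ S ++ S, pvValidD s := by
      intro s hs; rcases List.mem_append.mp hs with h' | h' <;> exact hSvalid s h'
    have hN0 : pvNet ([] : List String) = (0, 0) := rfl
    have hAiff : (can_return pos direction instructions = "Y"
        ↔ ((0, 0) : Int × Int) ∈ pvPrefixes (0, 0) (S ++ S)) := by
      rw [hA, hbridge, pvCancelLoop_spec (S ++ S) [] hdbl hIe, hN0]
    set T := pvFoldAdd (0, 0) S with hTdef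
    have hsplit : pvPrefixes ((0, 0) : Int × Int) (S ++ S)
        = pvPrefixes (0, 0) S ++ pvPrefixes T S := by
      rw [pvPrefixes_append]
    have hshift : ((0, 0) : Int × Int) ∈ pvPrefixes T S
        ↔ ((-T.1, -T.2) : Int × Int) ∈ pvPrefixes ((0, 0) : Int × Int) S := by
      conv_lhs => rw [show T = pvPadd T (0, 0) from (pvPadd_zero T).symm]
      rw [pvPrefixes_shift]
      simp only [List.mem_map]
      constructor
      · rintro ⟨z, hz, he⟩
        obtain ⟨z1, z2⟩ := z
        have h1 := congrArg Prod.fst he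
        have h2 := congrArg Prod.snd he
        simp [pvPadd] at h1 h2
        have : (z1, z2) = ((-T.1, -T.2) : Int × Int) := by
          simp [Prod.ext_iff]; omega
        rwa [← this]
      · intro hz
        exact ⟨(-T.1, -T.2), hz, by simp [pvPadd]⟩
    -- evaluate port B
    obtain ⟨hB1, hB2⟩ := pvAltLoop_eq instructions.toList direction 0 0 PySem.Set.empty hd
    rw [← hSdef, ← hTdef] at hB1
    rw [← hSdef] at hB2
    rcases hr : pvAltLoop instructions.toList (direction, 0, 0, PySem.Set.empty) with ⟨d', rx, ry, rP⟩
    rw [hr] at hB1 hB2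
    dsimp only at hB1 hB2
    have hrx : rx = T.1 := by rw [← hB1]
    have hry : ry = T.2 := by rw [← hB1]
    have hmemP : ∀ z : Int × Int, z ∈ rP ↔ z ∈ pvPrefixes ((0, 0) : Int × Int) S := by
      intro z
      rw [hB2, PySem.Set.mem_update]
      constructor
      · rintro (hz | hz)
        · cases hz
        · exact hz
      · exact Or.inr
    have hBiff : (can_return_alt pos direction instructions = "Y"
        ↔ (T = (0, 0) ∨ ((0, 0) : Int × Int) ∈ pvPrefixes ((0, 0) : Int × Int) S
            ∨ ((-T.1, -T.2) : Int × Int) ∈ pvPrefixes ((0, 0) : Int × Int) S)) := by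
      unfold can_return_alt
      rw [hr]
      dsimp only
      split_ifs with hcnd
      · refine ⟨fun _ => ?_, fun _ => rfl⟩
        rcases hcnd with h' | h' | h'
        · left; rw [← hB1]; exact h'
        · right; left; exact (hmemP _).mp h'
        · right; right; rw [hrx, hry] at h'; exact (hmemP _).mp h'
      · constructor
        · intro e; exact absurd e (by decide)
        intro hcon
        exfalso
        apply hcnd
        rcases hcon with h' | h' | h'
        · left; rw [hB1]; exact h'
        · right; left; exact (hmemP _).mpr h'
        · right; right; rw [hrx, hry]; exact (hmemP _).mpr h'
    -- the two conditions agree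
    have hcondiff : (((0, 0) : Int × Int) ∈ pvPrefixes (0, 0) (S ++ S))
        ↔ (T = (0, 0) ∨ ((0, 0) : Int × Int) ∈ pvPrefixes ((0, 0) : Int × Int) S
            ∨ ((-T.1, -T.2) : Int × Int) ∈ pvPrefixes ((0, 0) : Int × Int) S) := by
      rw [hsplit, List.mem_append, hshift]
      constructor
      · rintro (h' | h')
        · exact Or.inr (Or.inl h')
        · exact Or.inr (Or.inr h')
      · rintro (h' | h' | h')
        · have hm := pvFoldAdd_mem (0, 0) S hSne
          rw [← hTdef, h'] at hm
          exact Or.inl hm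
        · exact Or.inl h'
        · exact Or.inr h'
    have hfinal : (can_return pos direction instructions = "Y"
        ↔ can_return_alt pos direction instructions = "Y") := by
      rw [hAiff, hBiff, hcondiff]
    have hBcases : can_return_alt pos direction instructions = "Y"
        ∨ can_return_alt pos direction instructions = "N" := by
      unfold can_return_alt
      rw [hr]
      dsimp only
      split_ifs
      · exact Or.inl rfl
      · exact Or.inr rfl
    rcases pvCancelLoop_cases (t ++ S) [s0] with hres | hres
    · rw [hA, hres] at hfinal ⊢
      exact (hfinal.mp rfl).symm
    · rcases hBcases with e | e
      · exfalso
        rw [hA, hres] at hfinal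
        exact absurd (hfinal.mpr e) (by decide)
      · rw [hA, hres, e]
  · -- no 'G': A answers 'Y' at the guard, B's net displacement is zero
    have hIn : PySem.Str.isIn "G" instructions = false := by
      rcases hb : PySem.Str.isIn "G" instructions with _ | _
      · rfl
      · exact absurd ((List.singleton_infix_iff _ _).mp
          (pvGstr ▸ (PySem.Str.isIn_iff_infix _ _).mp hb)) hG
    have hA : can_return pos direction instructions = "Y" := by
      unfold can_return
      rw [if_pos (Or.inr hIn)]
    rw [hA]
    rcases hpre with h | h
    · have hd : pvValidD direction := by simpa [pvValidD] using h
      obtain ⟨hB1, _⟩ := pvAltLoop_eq instructions.toList direction 0 0 PySem.Set.empty hd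
      rw [pvStepsOf_eq_nil _ _ hG] at hB1
      rw [show pvFoldAdd ((0 : Int), (0 : Int)) [] = ((0 : Int), (0 : Int)) from rfl] at hB1
      unfold can_return_alt
      rcases hr : pvAltLoop instructions.toList (direction, 0, 0, PySem.Set.empty) with ⟨d', rx, ry, rP⟩
      rw [hr] at hB1
      dsimp only at hB1
      dsimp only
      rw [if_pos (Or.inl hB1)]
    · have hskip := pvAltLoop_skip instructions.toList (direction, 0, 0, PySem.Set.empty) h
      unfold can_return_alt
      rw [hskip]
      dsimp only
      rw [if_pos (Or.inl rfl)]
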